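-- pv_equiv track=rewrite | github.com/SeungHyeonHwang/CodingTest | BOJ/12437.py | solution
-- ===== SOURCE A (Python) =====
-- def solution(cal):
--     answer = 0
--     start = 0
--
--     for i in range(cal[0]):
--         end = (cal[1]+start)%cal[2]
--         answer+=(cal[1]+start)//cal[2]
--         if end == 0 :
--             start = 0
--         elif end != 0 :
--             answer+=1
--             start = end
--
--     return answer
-- ===== SOURCE B (Python) =====
-- def solution(cal):
--     # Cycle-based: the carried state follows a fixed permutation of residues,
--     # so it returns to 0 within |cal[2]| steps; sum one cycle and multiply.
--     # The walk is also capped at n steps, so B never does more work than A.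
--     n = cal[0]
--     if n <= 0:
--         return 0
--     a, m = cal[1], cal[2]
--     prefix = [0]  # prefix[k] = accumulated answer after k iterations from state 0
--     s = 0
--     while True:
--         e = (a + s) % m
--         prefix.append(prefix[-1] + (a + s) // m + (1 if e != 0 else 0))
--         s = e
--         if s == 0 or len(prefix) > n:
--             break
--     if s != 0:
--         return prefix[n]  # fewer than one full cycle was needed
--     p = len(prefix) - 1  # period of the state sequence
--     return (n // p) * prefix[p] + prefix[n % p]
-- ===== Notes on version B (the rewrite author's own statement) =====
-- stated objective: alternative
-- what changed: Replaces A's step-by-step simulation of all iterations by cycle detection on the carried remainder state (which returns to 0 within one period of the modulus; the walk is also capped at the iteration count), then combines whole-cycle sums with a prefix sum for the remainder; intended as faster when the iteration count far exceeds the modulus (measured 1.44x at the largest generated size, below the 1.5x confirmation bar).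
import Mathlib
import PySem

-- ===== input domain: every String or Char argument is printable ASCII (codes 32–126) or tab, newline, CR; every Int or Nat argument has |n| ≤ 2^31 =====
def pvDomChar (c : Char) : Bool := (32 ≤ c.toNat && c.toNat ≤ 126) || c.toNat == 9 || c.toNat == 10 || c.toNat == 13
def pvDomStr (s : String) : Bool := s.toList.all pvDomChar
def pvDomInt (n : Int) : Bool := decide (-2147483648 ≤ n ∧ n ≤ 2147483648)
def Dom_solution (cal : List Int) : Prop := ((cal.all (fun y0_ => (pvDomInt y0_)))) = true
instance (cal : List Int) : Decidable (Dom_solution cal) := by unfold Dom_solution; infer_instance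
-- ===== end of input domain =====

-- B replaces A's step-by-step simulation of all iterations by cycle detection on the
-- carried remainder state (it returns to 0 within one period of the modulus, and the walk
-- is also capped at the iteration count), then combines whole-cycle sums with a prefix.

-- ===== PORT A =====
def solution (cal : List Int) : Int :=
  let n := (PySem.List.pyGet? cal 0).getD 0
  let a := (PySem.List.pyGet? cal 1).getD 0
  let m := (PySem.List.pyGet? cal 2).getD 1
  ((PySem.List.pyRange 0 n 1).foldl
    (fun (st : Int × Int) _ =>
      let e := PySem.Int.mod (a + st.2) m
      let ans := st.1 + PySem.Int.floordiv (a + st.2) m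
      if e = 0 then (ans, 0) else (ans + 1, e))
    (0, 0)).1

-- ===== PORT B =====
-- B's while-loop; the Nat argument is pure termination fuel (|m| always suffices on Pre_).
-- Returns the prefix list together with the final state s.
def solveLoop (a m n : Int) : Nat → Int → List Int → List Int × Int
  | 0, s, pre => (pre, s)
  | fuel+1, s, pre =>
    let e := PySem.Int.mod (a + s) m
    let pre2 := pre ++ [pre.getLastD 0 + PySem.Int.floordiv (a + s) m + (if e ≠ 0 then 1 else 0)]
    if e = 0 ∨ (pre2.length : Int) > n then (pre2, e) else solveLoop a m n fuel e pre2

def solution_alt (cal : List Int) : Int :=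
  let n := (PySem.List.pyGet? cal 0).getD 0
  if n ≤ 0 then 0
  else
    let a := (PySem.List.pyGet? cal 1).getD 0
    let m := (PySem.List.pyGet? cal 2).getD 1
    let res := solveLoop a m n m.natAbs 0 [0]
    let pre := res.1
    if res.2 ≠ 0 then (PySem.List.pyGet? pre n).getD 0
    else
      let p : Int := (pre.length : Int) - 1
      PySem.Int.floordiv n p * pre.getLastD 0 + (PySem.List.pyGet? pre (PySem.Int.mod n p)).getD 0

-- ===== PRECONDITION & SPEC =====
-- Pre_ excludes exactly the inputs where A raises: empty cal (IndexError reading the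
-- first element), and, when the loop runs (first element positive), cal shorter than 3
-- (IndexError) or a zero third element (ZeroDivisionError).
def Pre_solution (cal : List Int) : Prop :=
  cal ≠ [] ∧ (0 < cal.headD 0 → 3 ≤ cal.length ∧ cal.getD 2 0 ≠ 0)
instance (cal : List Int) : Decidable (Pre_solution cal) := by unfold Pre_solution; infer_instance
def pvWitness_solution : List Int := [5, 3, 4]

def Spec_solution (cal : List Int) (out : Int) : Prop := out = solution_alt cal
instance (cal : List Int) (out : Int) : Decidable (Spec_solution cal out) := by unfold Spec_solution; infer_instance

-- ===== CLAIM (what is proved, stated in full; the proofs are below) =====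
def Claim_equal_solution : Prop := ∀ (cal : List Int), Dom_solution cal → Pre_solution cal → Spec_solution cal (solution cal)

-- ===== LEMMAS AND PROOFS =====

-- the loop body of A as one step function on (answer, start)
def stepF (a m : Int) (st : Int × Int) : Int × Int :=
  let e := PySem.Int.mod (a + st.2) m
  let ans := st.1 + PySem.Int.floordiv (a + st.2) m
  if e = 0 then (ans, 0) else (ans + 1, e)

-- accumulated answer / state after k iterations from (0,0)
def Pk (a m : Int) (k : Nat) : Int := ((stepF a m)^[k] (0, 0)).1
def Sk (a m : Int) (k : Nat) : Int := ((stepF a m)^[k] (0, 0)).2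

lemma foldl_eq_iter (a m : Int) (l : List Int) (st : Int × Int) :
    l.foldl
      (fun (st : Int × Int) _ =>
        let e := PySem.Int.mod (a + st.2) m
        let ans := st.1 + PySem.Int.floordiv (a + st.2) m
        if e = 0 then (ans, 0) else (ans + 1, e))
      st = (stepF a m)^[l.length] st := by
  induction l generalizing st with
  | nil => rfl
  | cons x xs ih =>
    simp only [List.foldl_cons, List.length_cons, Function.iterate_succ_apply]
    rw [ih]
    rfl

lemma stepF_snd (a m : Int) (st : Int × Int) :
    (stepF a m st).2 = PySem.Int.mod (a + st.2) m := by
  simp only [stepF]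
  split_ifs with h <;> simp [h]

lemma stepF_translate (a m x s : Int) :
    stepF a m (x, s) = (x + (stepF a m (0, s)).1, (stepF a m (0, s)).2) := by
  simp only [stepF]
  split_ifs <;> simp <;> ring

lemma iter_translate (a m : Int) (k : Nat) (x s : Int) :
    (stepF a m)^[k] (x, s) =
      (x + ((stepF a m)^[k] (0, s)).1, ((stepF a m)^[k] (0, s)).2) := by
  induction k generalizing x s with
  | zero => simp
  | succ k ih =>
    rw [Function.iterate_succ_apply, Function.iterate_succ_apply]
    rw [stepF_translate]
    rcases h : stepF a m (0, s) with ⟨c, s'⟩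
    rw [ih, ih c s']
    simp [add_assoc]

lemma fmod_absorb (x y m : Int) :
    PySem.Int.mod (x + PySem.Int.mod y m) m = PySem.Int.mod (x + y) m := by
  have h := PySem.Int.floordiv_mul_add_mod y m
  have : x + PySem.Int.mod y m = (x + y) + m * (-(PySem.Int.floordiv y m)) := by linarith
  rw [this]
  show ((x + y) + m * (-(PySem.Int.floordiv y m))).fmod m = (x + y).fmod m
  exact Int.add_mul_fmod_self_left ..

lemma Sk_eq (a m : Int) (k : Nat) : Sk a m k = PySem.Int.mod ((k : Int) * a) m := by
  induction k with
  | zero => simp [Sk, PySem.Int.mod, Int.zero_fmod]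
  | succ k ih =>
    unfold Sk at *
    rw [Function.iterate_succ_apply', stepF_snd, ih, fmod_absorb]
    push_cast
    ring_nf

lemma Sk_natAbs (a m : Int) : Sk a m m.natAbs = 0 := by
  rw [Sk_eq, PySem.Int.mod_eq_zero_iff_dvd]
  exact dvd_mul_of_dvd_left (Int.dvd_natAbs.mpr dvd_rfl) a

lemma Pk_succ (a m : Int) (k : Nat) :
    Pk a m (k+1) = Pk a m k + PySem.Int.floordiv (a + Sk a m k) m +
      (if PySem.Int.mod (a + Sk a m k) m ≠ 0 then 1 else 0) := by
  unfold Pk Sk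
  rw [Function.iterate_succ_apply']
  rcases h : (stepF a m)^[k] (0, 0) with ⟨x, s⟩
  simp only [stepF]
  split_ifs <;> simp_all <;> ring

lemma Sk_succ (a m : Int) (k : Nat) :
    Sk a m (k+1) = PySem.Int.mod (a + Sk a m k) m := by
  unfold Sk
  rw [Function.iterate_succ_apply', stepF_snd]

lemma Pk_periodic (a m : Int) (p : Nat) (hp : Sk a m p = 0) (k : Nat) :
    Pk a m (k + p) = Pk a m p + Pk a m k := by
  unfold Pk
  rw [Function.iterate_add_apply]
  have h0 : (stepF a m)^[p] (0, 0) = (Pk a m p, 0) := by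
    have := hp; unfold Sk at this
    rcases h : (stepF a m)^[p] (0, 0) with ⟨x, s⟩
    unfold Pk; rw [h]; simp [h] at this; simp [this]
  rw [h0, iter_translate]

lemma Pk_cycles (a m : Int) (p : Nat) (hp : Sk a m p = 0) (q r : Nat) :
    Pk a m (q * p + r) = (q : Int) * Pk a m p + Pk a m r := by
  induction q with
  | zero => simp
  | succ q ih =>
    have : (q + 1) * p + r = (q * p + r) + p := by ring
    rw [this, Pk_periodic a m p hp, ih]
    push_cast
    ring

-- first return of the state to 0 (exists: Sk |m| = 0, and |m| ≥ 1 when m ≠ 0)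
lemma exists_return (a m : Int) (hm : m ≠ 0) : ∃ k, Sk a m (k+1) = 0 := by
  have h1 : 1 ≤ m.natAbs := by omega
  exact ⟨m.natAbs - 1, by rw [Nat.sub_add_cancel h1]; exact Sk_natAbs a m⟩

lemma solveLoop_spec (a m n : Int) (p0 : Nat)
    (hp0 : Sk a m p0 = 0)
    (hmin : ∀ i, 0 < i → i < p0 → Sk a m i ≠ 0) :
    ∀ fuel j, j < p0 → (j : Int) < n → min p0 n.toNat ≤ j + fuel →
      solveLoop a m n fuel (Sk a m j) ((List.range (j+1)).map (Pk a m)) =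
        ((List.range (min p0 n.toNat + 1)).map (Pk a m), Sk a m (min p0 n.toNat)) := by
  intro fuel
  induction fuel with
  | zero => intro j h1 h2 h3; omega
  | succ fuel ih =>
    intro j h1 h2 h3
    rw [solveLoop]
    have hjn : j < n.toNat := by omega
    have hlast : (((List.range (j+1)).map (Pk a m)).getLastD 0) = Pk a m j := by
      rw [List.range_succ, List.map_append]
      simp
    have happ : ((List.range (j+1)).map (Pk a m)) ++
        [((List.range (j+1)).map (Pk a m)).getLastD 0 + PySem.Int.floordiv (a + Sk a m j) m +
          (if PySem.Int.mod (a + Sk a m j) m ≠ 0 then 1 else 0)] =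
        (List.range (j+2)).map (Pk a m) := by
      rw [hlast, ← Pk_succ]
      simp [List.range_succ]
    simp only [happ]
    have hlen : (((List.range (j+2)).map (Pk a m)).length : Int) = ((j : Int) + 2) := by
      simp
    by_cases he : PySem.Int.mod (a + Sk a m j) m = 0
    · -- state returns to 0 now: p0 = j+1 and the walk stops
      have hs1 : Sk a m (j+1) = 0 := by rw [Sk_succ]; exact he
      have hpj : p0 = j + 1 := by
        by_contra hne
        exact hmin (j+1) (by omega) (by omega) hs1
      have hmineq : min p0 n.toNat = j + 1 := by omega
      rw [if_pos (Or.inl he), hmineq, ← Sk_succ a m j]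
    · have hs1 : Sk a m (j+1) ≠ 0 := by rw [Sk_succ]; exact he
      have hj1p : j + 1 < p0 := by
        rcases Nat.lt_or_ge (j+1) p0 with h | h
        · exact h
        · have : p0 = j + 1 := by omega
          exact absurd (this ▸ hp0) hs1
      by_cases hcap : ((j : Int) + 2) > n
      · -- the n-step cap stops the walk: min p0 n.toNat = j+1 = n.toNat
        have hmineq : min p0 n.toNat = j + 1 := by omega
        rw [if_pos (Or.inr (by rw [hlen]; exact hcap)), hmineq, ← Sk_succ a m j]
      · have hcond : ¬ (PySem.Int.mod (a + Sk a m j) m = 0 ∨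
            (((List.range (j+2)).map (Pk a m)).length : Int) > n) := by
          rw [hlen]; push_neg; exact ⟨he, by omega⟩
        rw [if_neg hcond, ← Sk_succ]
        have := ih (j+1) hj1p (by push_cast; omega) (by omega)
        simpa [show j + 1 + 1 = j + 2 from rfl] using this

-- ===== VERDICT (by name: the statement is the Claim_ definition above) =====
theorem solution_spec : Claim_equal_solution := by
  intro cal _ hpre
  unfold Spec_solution
  obtain ⟨hne, himp⟩ := hpre
  unfold solution solution_alt
  simp only []
  set n := (PySem.List.pyGet? cal 0).getD 0 with hn
  set a := (PySem.List.pyGet? cal 1).getD 0 with ha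
  set m := (PySem.List.pyGet? cal 2).getD 1 with hm
  by_cases hn0 : n ≤ 0
  · rw [if_pos hn0]
    rw [PySem.List.pyRange_one_eq_nil (by omega)]
    rfl
  · rw [if_neg hn0]
    push_neg at hn0
    -- n = cal[0] = cal.headD 0 > 0, so Pre gives length ≥ 3 and cal[2] ≠ 0
    have hhead : cal.headD 0 = n := by
      rcases cal with _ | ⟨x, xs⟩
      · exact absurd rfl hne
      · simp [hn, PySem.List.pyGet?_zero_cons]
    have hlen : 3 ≤ cal.length ∧ cal.getD 2 0 ≠ 0 := himp (by omega)
    have hm0 : m ≠ 0 := by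
      have h3 : 3 ≤ cal.length := hlen.1
      have hg : PySem.List.pyGet? cal 2 = cal[(2:Int).toNat]? :=
        PySem.List.pyGet?_of_nonneg _ (by norm_num)
      rw [hm, hg, show ((2:Int).toNat) = 2 from rfl,
        List.getElem?_eq_getElem (show 2 < cal.length by omega)]
      simpa [List.getD, List.getElem?_eq_getElem (show 2 < cal.length by omega)] using hlen.2
    -- characterize A
    rw [foldl_eq_iter, PySem.List.length_pyRange_one]
    have hA : ((stepF a m)^[(n - 0).toNat] (0, 0)).1 = Pk a m n.toNat := by
      unfold Pk; norm_num
    rw [hA]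
    -- characterize B's loop
    have hex : ∃ k, Sk a m (k+1) = 0 := exists_return a m hm0
    set p0 := Nat.find hex + 1 with hp0def
    have hp0 : Sk a m p0 = 0 := Nat.find_spec hex
    have hmin : ∀ i, 0 < i → i < p0 → Sk a m i ≠ 0 := by
      intro i hi1 hi2
      have := Nat.find_min hex (m := i - 1) (by omega)
      have hieq : i - 1 + 1 = i := by omega
      rwa [hieq] at this
    have hp0le : p0 ≤ m.natAbs := by
      by_contra hgt
      push_neg at hgt
      have hna : 0 < m.natAbs := by omega
      exact hmin m.natAbs hna hgt (Sk_natAbs a m)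
    have hn1 : 1 ≤ n.toNat := by omega
    set t := min p0 n.toNat with ht
    have hloop : solveLoop a m n m.natAbs 0 [0] =
        ((List.range (t+1)).map (Pk a m), Sk a m t) := by
      have h0l : ((List.range 1).map (Pk a m)) = [0] := rfl
      rw [← h0l, show (0:Int) = Sk a m 0 from rfl]
      exact solveLoop_spec a m n p0 hp0 hmin m.natAbs 0 (by omega) (by push_cast; omega)
        (by omega)
    rw [hloop]
    simp only []
    have hlen2 : ((List.range (t+1)).map (Pk a m)).length = t + 1 := by simp
    by_cases hst : Sk a m t = 0
    · -- a full cycle was completed: t = p0 ≤ n.toNat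
      have htp : t = p0 := by
        rcases Nat.lt_or_ge p0 n.toNat with h | h
        · omega
        · by_cases hq : t = p0
          · exact hq
          · have htn : t = n.toNat := by omega
            rcases Nat.lt_or_ge n.toNat p0 with h2 | h2
            · exact absurd (htn ▸ hst) (hmin n.toNat (by omega) h2)
            · omega
      rw [if_neg (by simp [hst])]
      rw [hlen2]
      have hpcast : ((t + 1 : Nat) : Int) - 1 = (t : Int) := by push_cast; ring
      rw [hpcast]
      have hp0pos : (0 : Int) < (t : Int) := by
        have : 0 < t := by omega
        exact_mod_cast this
      have hlastB : ((List.range (t+1)).map (Pk a m)).getLastD 0 = Pk a m t := by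
        rw [List.range_succ, List.map_append]; simp
      rw [hlastB]
      set q : Int := PySem.Int.floordiv n (t : Int) with hq
      set r : Int := PySem.Int.mod n (t : Int) with hr
      have hqe : q = n / (t : Int) := PySem.Int.floordiv_eq_ediv_of_pos hp0pos
      have hre : r = n % (t : Int) := PySem.Int.mod_eq_emod_of_pos hp0pos
      have hr0 : 0 ≤ r := by rw [hre]; exact Int.emod_nonneg n (by omega)
      have hrlt : r < (t : Int) := by rw [hre]; exact Int.emod_lt_of_pos n hp0pos
      have hq0 : 0 ≤ q := by rw [hqe]; exact Int.ediv_nonneg (by omega) (by omega)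
      have hget : (PySem.List.pyGet? ((List.range (t+1)).map (Pk a m)) r).getD 0 =
          Pk a m r.toNat := by
        rw [PySem.List.pyGet?_of_nonneg _ hr0]
        rw [List.getElem?_map, List.getElem?_range (by omega)]
        rfl
      rw [hget]
      have hnn : (t : Int) * q + r = n := by
        rw [hqe, hre]; exact Int.ediv_add_emod n (t : Int)
      clear_value q r
      have hnsplit : n.toNat = q.toNat * t + r.toNat := by
        have h1 : ((q.toNat * t + r.toNat : Nat) : Int) = n := by
          push_cast
          rw [Int.toNat_of_nonneg hq0, Int.toNat_of_nonneg hr0]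
          linarith
        have h2 := congrArg Int.toNat h1
        simp only [Int.toNat_natCast] at h2
        exact h2.symm
      rw [hnsplit, Pk_cycles a m t (htp ▸ hp0) q.toNat r.toNat]
      have : ((q.toNat : Nat) : Int) = q := by omega
      rw [this]
    · -- the cap stopped the walk first: t = n.toNat, fewer than a full cycle
      have htn : t = n.toNat := by
        rcases Nat.lt_or_ge p0 n.toNat with h | h
        · exact absurd (by rw [show t = p0 by omega]; exact hp0) hst
        · omega
      rw [if_pos (by simpa using hst)]
      have hget : (PySem.List.pyGet? ((List.range (t+1)).map (Pk a m)) n).getD 0 =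
          Pk a m n.toNat := by
        rw [PySem.List.pyGet?_of_nonneg _ (by omega)]
        rw [List.getElem?_map, List.getElem?_range (by omega)]
        rfl
      rw [hget]
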